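-- pv_equiv track=rewrite | github.com/VictorOroo/Phase-3-week-1-code-challenge | Challenge-3.py | highest_consonant_value
-- ===== SOURCE A (Python) =====
-- def highest_consonant_value(input_str):
--     vowels = set('aeiou')
--     max_value = 0
--     current_value = 0
--
--     for char in input_str:
--         if char.isalpha() and char.lower() not in vowels:
--             current_value = max(0,current_value + ord(char) - ord('a') + 1)
--             max_value = max(max_value, current_value)
--         else:
--              current_value = 0
--
--     return max_value
-- ===== SOURCE B (Python) =====
-- def highest_consonant_value(input_str):
--     vowels = set('aeiou')
--     # phase 1: tokenize the string into maximal runs of consonant letter values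
--     runs = []
--     cur = []
--     for char in input_str:
--         if char.isalpha() and char.lower() not in vowels:
--             cur.append(ord(char) - ord('a') + 1)
--         elif cur:
--             runs.append(cur)
--             cur = []
--     if cur:
--         runs.append(cur)
--     # phase 2: per run, best subarray sum via prefix sums and a running minimum prefix
--     best = 0
--     for run in runs:
--         prefix = 0
--         lowest = 0
--         for v in run:
--             prefix += v
--             if prefix - lowest > best:
--                 best = prefix - lowest
--             if prefix < lowest:
--                 lowest = prefix
--     return best
-- ===== Notes on version B (the rewrite author's own statement) =====
-- stated objective: alternative
-- what changed: Replaces the single-pass Kadane recurrence max(0,cur+v) by a two-phase algorithm: first tokenize the string into maximal runs of consonant letter values, then for each run compute the best subarray sum via prefix sums with a running minimum prefix.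
import Mathlib
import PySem

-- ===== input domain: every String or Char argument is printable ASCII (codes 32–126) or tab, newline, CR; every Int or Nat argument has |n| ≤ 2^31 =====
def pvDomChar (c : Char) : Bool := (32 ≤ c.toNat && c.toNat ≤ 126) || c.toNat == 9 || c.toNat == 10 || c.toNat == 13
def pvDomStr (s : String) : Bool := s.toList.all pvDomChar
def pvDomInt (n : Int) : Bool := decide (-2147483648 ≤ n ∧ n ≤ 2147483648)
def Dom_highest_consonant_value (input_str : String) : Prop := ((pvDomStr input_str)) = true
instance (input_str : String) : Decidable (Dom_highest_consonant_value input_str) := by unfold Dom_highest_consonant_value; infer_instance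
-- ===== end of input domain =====

-- B replaces the single-pass Kadane recurrence by a two-phase algorithm (tokenize into
-- consonant runs, then a prefix-sum/minimum-prefix scan per run); objective: alternative.

-- ===== PORT A =====
-- char.isalpha() and char.lower() not in {'a','e','i','o','u'} (exact on the ASCII domain)
def pvIsConsA (c : Char) : Bool :=
  PySem.Chars.isalpha c && !((['a', 'e', 'i', 'o', 'u'] : List Char).contains (PySem.Chars.lowerChar c))

def pvStepA (st : Int × Int) (c : Char) : Int × Int :=
  if pvIsConsA c then
    let cur := max 0 (st.2 + (c.toNat : Int) - 97 + 1)
    (max st.1 cur, cur)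
  else
    (st.1, 0)

def highest_consonant_value (input_str : String) : Int :=
  (input_str.toList.foldl pvStepA (0, 0)).1

-- ===== PORT B =====
def pvIsConsB (c : Char) : Bool :=
  PySem.Chars.isalpha c && !((['a', 'e', 'i', 'o', 'u'] : List Char).contains (PySem.Chars.lowerChar c))

-- phase 1 of Source B: split into maximal runs of consonant letter values
def pvSplitRuns : List Char → List Int → List (List Int)
  | [], cur => if cur.isEmpty then [] else [cur]
  | c :: cs, cur =>
    if pvIsConsB c then pvSplitRuns cs (cur ++ [(c.toNat : Int) - 97 + 1])
    else if cur.isEmpty then pvSplitRuns cs []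
    else cur :: pvSplitRuns cs []

-- phase 2 inner loop of Source B: state (best, prefix, lowest)
def pvRunStep (st : Int × Int × Int) (v : Int) : Int × Int × Int :=
  let pfx := st.2.1 + v
  let best := if pfx - st.2.2 > st.1 then pfx - st.2.2 else st.1
  let lowest := if pfx < st.2.2 then pfx else st.2.2
  (best, pfx, lowest)

def highest_consonant_value_alt (input_str : String) : Int :=
  (pvSplitRuns input_str.toList []).foldl
    (fun best run => (run.foldl pvRunStep (best, 0, 0)).1) 0

-- ===== PRECONDITION & SPEC =====
def Spec_highest_consonant_value (input_str : String) (out : Int) : Prop := out = highest_consonant_value_alt input_str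
instance (input_str : String) (out : Int) : Decidable (Spec_highest_consonant_value input_str out) := by unfold Spec_highest_consonant_value; infer_instance

-- ===== CLAIM (what is proved, stated in full; the proofs are below) =====
def Claim_equal_highest_consonant_value : Prop := ∀ (input_str : String), Dom_highest_consonant_value input_str → Spec_highest_consonant_value input_str (highest_consonant_value input_str)

-- ===== LEMMAS AND PROOFS =====

theorem pvIsConsB_eq (c : Char) : pvIsConsB c = pvIsConsA c := rfl

-- the best component of the phase-2 scan never decreases
theorem pvRun_mono : ∀ (run : List Int) (b p l : Int), b ≤ (run.foldl pvRunStep (b, p, l)).1 := by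
  intro run
  induction run with
  | nil => intro b p l; simp
  | cons v vs ih =>
    intro b p l
    simp only [List.foldl_cons]
    refine le_trans ?_ (ih _ _ _)
    simp only [pvRunStep]
    split <;> omega

-- main invariant: A's Kadane fold from the state determined by the pending run equals
-- B's run-wise computation continued from the pending run
theorem pvMain : ∀ (cs : List Char) (pending : List Int) (best : Int), 0 ≤ best →
    (cs.foldl pvStepA ((pending.foldl pvRunStep (best, 0, 0)).1,
        (pending.foldl pvRunStep (best, 0, 0)).2.1 - (pending.foldl pvRunStep (best, 0, 0)).2.2)).1
      = (pvSplitRuns cs pending).foldl (fun b run => (run.foldl pvRunStep (b, 0, 0)).1) best := by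
  intro cs
  induction cs with
  | nil =>
    intro pending best hb
    by_cases h : pending.isEmpty
    · simp [pvSplitRuns, List.isEmpty_iff.mp h]
    · simp [pvSplitRuns, h]
  | cons c cs ih =>
    intro pending best hb
    simp only [List.foldl_cons, pvSplitRuns, pvIsConsB_eq]
    by_cases hc : pvIsConsA c
    · -- consonant: extend the pending run
      simp only [hc, if_true]
      have hfold : (pending ++ [(c.toNat : Int) - 97 + 1]).foldl pvRunStep (best, 0, 0)
          = pvRunStep (pending.foldl pvRunStep (best, 0, 0)) ((c.toNat : Int) - 97 + 1) := by
        simp [List.foldl_append]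
      have hb' : 0 ≤ (pending.foldl pvRunStep (best, 0, 0)).1 := le_trans hb (pvRun_mono _ _ _ _)
      have := ih (pending ++ [(c.toNat : Int) - 97 + 1]) best hb
      rw [hfold] at this
      rw [← this]
      set S := pending.foldl pvRunStep (best, 0, 0) with hS
      obtain ⟨b, p, l⟩ := S
      simp only [pvStepA, hc, if_true, pvRunStep] at *
      have hpair : ∀ x y : Int × Int, x = y → (List.foldl pvStepA x cs).1 = (List.foldl pvStepA y cs).1 := by
        intro x y h; rw [h]
      apply hpair
      simp only [Prod.mk.injEq]
      refine ⟨?_, ?_⟩ <;> split_ifs <;> omega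
    · -- non-consonant: close the pending run
      simp only [hc]
      by_cases h : pending.isEmpty
      · have hp : pending = [] := List.isEmpty_iff.mp h
        subst hp
        simpa [pvStepA, hc] using ih [] best hb
      · simp only [h]
        have hb' : 0 ≤ (pending.foldl pvRunStep (best, 0, 0)).1 := le_trans hb (pvRun_mono _ _ _ _)
        have := ih [] ((pending.foldl pvRunStep (best, 0, 0)).1) hb'
        simpa [pvStepA, hc] using this

-- ===== VERDICT (by name: the statement is the Claim_ definition above) =====
theorem highest_consonant_value_spec : Claim_equal_highest_consonant_value := by
  intro s _
  show highest_consonant_value s = highest_consonant_value_alt s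
  have := pvMain s.toList [] 0 le_rfl
  simpa [highest_consonant_value, highest_consonant_value_alt] using this
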